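-- pv_equiv track=rewrite | github.com/chaooo1218/taiwan-stock-ai-bot | modules/news_linker.py | link_news_to_stock
-- ===== SOURCE A (Python) =====
-- def _clean(s: str) -> str:
--     return (s or "").lower().strip()
--
-- def link_news_to_stock(news_list, stock_id, aliases_map):
--     kws = aliases_map.get(stock_id, [])
--     res = []
--     for n in news_list or []:
--         title = _clean(n.get("title"))
--         content = _clean(n.get("content"))
--         hit = False
--         for kw in kws:
--             if kw in title or kw in content:
--                 hit = True
--                 break
--         if hit:
--             res.append(n)
--     return res
-- ===== SOURCE B (Python) =====
-- def _clean(s: str) -> str: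
--     return (s or "").lower().strip()
--
-- def link_news_to_stock(news_list, stock_id, aliases_map):
--     # Keyword-major sweep: clean every text once, keep a parallel boolean
--     # hit-vector, OR in each keyword's matches, then filter by the vector.
--     kws = aliases_map.get(stock_id, [])
--     news = list(news_list or [])
--     texts = [(_clean(n.get("title")), _clean(n.get("content"))) for n in news]
--     hits = [False] * len(texts)
--     for kw in kws:
--         hits = [h or kw in t or kw in c for h, (t, c) in zip(hits, texts)]
--     return [n for n, h in zip(news, hits) if h]
-- ===== Notes on version B (the rewrite author's own statement) =====
-- stated objective: alternative
-- what changed: Replaces the per-news inner keyword loop with break by a keyword-major sweep: texts are cleaned once into a list, a parallel boolean hit-vector is OR-accumulated one keyword at a time, and the result is the news filtered by that vector.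
import Mathlib
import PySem

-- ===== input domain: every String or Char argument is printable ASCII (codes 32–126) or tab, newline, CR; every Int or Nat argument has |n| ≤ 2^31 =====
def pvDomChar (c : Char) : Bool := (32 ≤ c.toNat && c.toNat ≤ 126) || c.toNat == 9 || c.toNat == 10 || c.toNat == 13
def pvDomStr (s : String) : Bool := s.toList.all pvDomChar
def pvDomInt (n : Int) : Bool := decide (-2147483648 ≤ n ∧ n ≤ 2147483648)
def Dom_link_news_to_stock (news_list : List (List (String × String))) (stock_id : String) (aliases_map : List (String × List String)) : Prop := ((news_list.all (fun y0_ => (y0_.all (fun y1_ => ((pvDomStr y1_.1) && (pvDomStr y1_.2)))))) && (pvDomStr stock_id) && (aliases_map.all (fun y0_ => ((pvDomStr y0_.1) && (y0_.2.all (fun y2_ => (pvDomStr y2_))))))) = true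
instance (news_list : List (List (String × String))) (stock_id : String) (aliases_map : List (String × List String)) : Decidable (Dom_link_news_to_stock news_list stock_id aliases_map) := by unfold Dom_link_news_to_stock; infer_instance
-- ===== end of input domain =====

-- B replaces A's per-news inner keyword loop (with break) by a keyword-major sweep over a
-- precomputed cleaned-text list with an OR-accumulated boolean hit-vector; alternative
-- structure, same asymptotic cost.

-- ===== PORT A =====
-- _clean(s): (s or "").lower().strip()  (missing dict key → None → "")
def pvCleanA (s : Option String) : String := PySem.Str.strip (PySem.Str.lower (s.getD ""))

-- A's inner 'for kw in kws: if kw in title or kw in content: hit = True; break'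
def pvHitLoop (kws : List String) (title content : String) : Bool :=
  match kws with
  | [] => false
  | kw :: rest =>
    if PySem.Str.isIn kw title || PySem.Str.isIn kw content then true
    else pvHitLoop rest title content

def link_news_to_stock (news_list : List (List (String × String))) (stock_id : String) (aliases_map : List (String × List String)) : List (List (String × String)) :=
  let kws := PySem.Dict.getD (PySem.Dict.mk aliases_map) stock_id []
  news_list.foldl (fun res n =>
    let title := pvCleanA ((PySem.Dict.mk n).get? "title")
    let content := pvCleanA ((PySem.Dict.mk n).get? "content")
    let hit := pvHitLoop kws title content
    if hit then res ++ [n] else res) []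

-- ===== PORT B =====
def pvCleanB (s : Option String) : String := PySem.Str.strip (PySem.Str.lower (s.getD ""))

def link_news_to_stock_alt (news_list : List (List (String × String))) (stock_id : String) (aliases_map : List (String × List String)) : List (List (String × String)) :=
  let kws := PySem.Dict.getD (PySem.Dict.mk aliases_map) stock_id []
  let texts := news_list.map (fun n =>
    (pvCleanB ((PySem.Dict.mk n).get? "title"), pvCleanB ((PySem.Dict.mk n).get? "content")))
  let hits := kws.foldl
    (fun hits kw => (hits.zip texts).map
      (fun p => p.1 || (PySem.Str.isIn kw p.2.1 || PySem.Str.isIn kw p.2.2)))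
    (List.replicate texts.length false)
  ((news_list.zip hits).filter (fun p => p.2)).map (fun p => p.1)

-- ===== PRECONDITION & SPEC =====
def Spec_link_news_to_stock (news_list : List (List (String × String))) (stock_id : String) (aliases_map : List (String × List String)) (out : List (List (String × String))) : Prop := out = link_news_to_stock_alt news_list stock_id aliases_map
instance (news_list : List (List (String × String))) (stock_id : String) (aliases_map : List (String × List String)) (out : List (List (String × String))) : Decidable (Spec_link_news_to_stock news_list stock_id aliases_map out) := by unfold Spec_link_news_to_stock; infer_instance

-- ===== CLAIM (what is proved, stated in full; the proofs are below) =====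
def Claim_equal_link_news_to_stock : Prop := ∀ (news_list : List (List (String × String))) (stock_id : String) (aliases_map : List (String × List String)), Dom_link_news_to_stock news_list stock_id aliases_map → Spec_link_news_to_stock news_list stock_id aliases_map (link_news_to_stock news_list stock_id aliases_map)

-- ===== LEMMAS AND PROOFS =====

-- A's break-loop is an 'any' over the keywords.
theorem pvHitLoop_eq_any (kws : List String) (t c : String) :
    pvHitLoop kws t c = kws.any (fun kw => PySem.Str.isIn kw t || PySem.Str.isIn kw c) := by
  induction kws with
  | nil => rfl
  | cons kw rest ih =>
    simp only [pvHitLoop, List.any_cons, ih]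
    split <;> simp_all

-- A's accumulating foldl is a filter.
theorem pvFoldl_filter {α : Type} (p : α → Bool) (l acc : List α) :
    l.foldl (fun res n => if p n then res ++ [n] else res) acc = acc ++ l.filter p := by
  induction l generalizing acc with
  | nil => simp
  | cons a t ih =>
    simp only [List.foldl_cons, List.filter_cons, ih]
    by_cases h : p a = true <;> simp [h]

-- B's keyword-major OR-accumulation computes, pointwise, the 'any' over the keywords.
theorem pvHits_general {α : Type} (kws : List String) (l : List α)
    (g : α → String × String) (f : α → Bool) :
    kws.foldl
      (fun hits kw => (hits.zip (l.map g)).map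
        (fun p => p.1 || (PySem.Str.isIn kw p.2.1 || PySem.Str.isIn kw p.2.2)))
      (l.map f)
    = l.map (fun x => f x ||
        kws.any (fun kw => PySem.Str.isIn kw (g x).1 || PySem.Str.isIn kw (g x).2)) := by
  induction kws generalizing f with
  | nil => simp
  | cons kw rest ih =>
    simp only [List.foldl_cons, List.zip_map', List.map_map]
    have := ih (fun x => f x || (PySem.Str.isIn kw (g x).1 || PySem.Str.isIn kw (g x).2))
    rw [show ((fun p : Bool × (String × String) =>
          p.1 || (PySem.Str.isIn kw p.2.1 || PySem.Str.isIn kw p.2.2)) ∘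
          fun x => (f x, g x))
        = (fun x => f x || (PySem.Str.isIn kw (g x).1 || PySem.Str.isIn kw (g x).2)) from rfl,
      this]
    simp [Bool.or_assoc]

-- Filtering by a parallel vector of predicate values is filtering by the predicate.
theorem pvZipFilter {α : Type} (p : α → Bool) (l : List α) :
    ((l.zip (l.map p)).filter (fun x => x.2)).map (fun x => x.1) = l.filter p := by
  induction l with
  | nil => rfl
  | cons a t ih =>
    simp only [List.map_cons, List.zip_cons_cons, List.filter_cons]
    by_cases h : p a = true <;> simp [h, ih]

-- ===== VERDICT (by name: the statement is the Claim_ definition above) =====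
theorem link_news_to_stock_spec : Claim_equal_link_news_to_stock := by
  intro news_list stock_id aliases_map _
  unfold Spec_link_news_to_stock link_news_to_stock link_news_to_stock_alt
  simp only []
  set kws := PySem.Dict.getD (PySem.Dict.mk aliases_map) stock_id [] with hkws
  have hrep : List.replicate
      (news_list.map (fun n =>
        (pvCleanB ((PySem.Dict.mk n).get? "title"),
         pvCleanB ((PySem.Dict.mk n).get? "content")))).length false
      = news_list.map (fun _ => false) := by
    simp
  rw [pvFoldl_filter (fun n => pvHitLoop kws
        (pvCleanA ((PySem.Dict.mk n).get? "title"))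
        (pvCleanA ((PySem.Dict.mk n).get? "content"))), hrep,
      pvHits_general kws news_list
        (fun n => (pvCleanB ((PySem.Dict.mk n).get? "title"),
                   pvCleanB ((PySem.Dict.mk n).get? "content")))
        (fun _ => false)]
  simp only [Bool.false_or]
  rw [pvZipFilter (fun n => kws.any (fun kw =>
        PySem.Str.isIn kw (pvCleanB ((PySem.Dict.mk n).get? "title")) ||
        PySem.Str.isIn kw (pvCleanB ((PySem.Dict.mk n).get? "content")))) news_list]
  simp [pvHitLoop_eq_any, pvCleanA, pvCleanB]
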